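-- pv_equiv track=rewrite | github.com/ArturMkrt/advanced_python- | Lesson 1/second.py | dup_with_same_symbol_count
-- ===== SOURCE A (Python) =====
-- def get_chars_set_with_count(s):
-- 	a = {}
-- 	for c in s:
-- 		if c in a:
-- 			a[c] +=1
-- 		else:
-- 			a[c]= 1
-- 	return a
--
-- def dup_with_same_symbol_count(strs):
-- 	start = get_chars_set_with_count(strs[0])
-- 	i = 1
-- 	while i<len(strs) and len(start):
-- 		a = get_chars_set_with_count(strs[i])
-- 		for c in list(start.keys()):
-- 			if c in a:
-- 				start[c] = min(a[c], start[c])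
-- 			else:
-- 				del start[c]
-- 		i += 1
-- 	return sum(start.values())
-- ===== SOURCE B (Python) =====
-- def dup_with_same_symbol_count(strs):
--     total = 0
--     for c in dict.fromkeys(strs[0]):
--         total += min(s.count(c) for s in strs)
--     return total
-- ===== Notes on version B (the rewrite author's own statement) =====
-- stated objective: simpler
-- what changed: Replaces the running-dict intersection (build a char-count dict per string, then per-key min/del passes mutating the dict, stopping early when empty) by a direct per-character computation: for each distinct character of strs[0], add the minimum of s.count(c) over all strings; no dictionary state is maintained.
import Mathlib
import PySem

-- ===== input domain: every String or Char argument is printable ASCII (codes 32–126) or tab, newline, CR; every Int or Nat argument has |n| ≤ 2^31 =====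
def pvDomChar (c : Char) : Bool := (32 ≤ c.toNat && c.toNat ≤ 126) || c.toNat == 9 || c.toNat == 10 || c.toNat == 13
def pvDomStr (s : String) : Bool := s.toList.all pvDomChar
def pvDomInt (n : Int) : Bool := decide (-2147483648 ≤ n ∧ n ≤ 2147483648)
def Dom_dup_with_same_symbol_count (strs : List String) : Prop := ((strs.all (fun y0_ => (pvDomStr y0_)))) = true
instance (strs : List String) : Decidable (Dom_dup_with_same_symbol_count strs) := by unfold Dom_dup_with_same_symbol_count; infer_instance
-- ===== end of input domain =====

-- B replaces A's running-dict intersection by a per-character sum of minimum counts (objective: simpler).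

-- ===== PORT A =====
-- get_chars_set_with_count: build a char -> count dict by a loop over the string
def pvCounterA (s : List Char) : PySem.Dict Char Int :=
  s.foldl (fun a c => if a.contains c then a.insert c (a.getD c 0 + 1) else a.insert c 1)
    PySem.Dict.empty

-- the body of the while-loop: for c in list(start.keys()): min-update or delete
def pvStepA (a start : PySem.Dict Char Int) : PySem.Dict Char Int :=
  start.keys.foldl
    (fun st c =>
      if a.contains c then st.insert c (min (a.getD c 0) (st.getD c 0))
      else st.erase c)
    start

-- while i < len(strs) and len(start): recursion over the remaining strings
def pvLoopA : List String → PySem.Dict Char Int → PySem.Dict Char Int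
  | [], st => st
  | s :: rest, st =>
    if st.size = 0 then st
    else pvLoopA rest (pvStepA (pvCounterA s.toList) st)

def dup_with_same_symbol_count (strs : List String) : Int :=
  match strs with
  | [] => 0  -- unreachable under Pre_ (Python raises IndexError on strs[0])
  | s0 :: rest => (pvLoopA rest (pvCounterA s0.toList)).values.sum

-- ===== PORT B =====
-- min(s.count(c) for s in strs); s.count(c) for a single char c is exactly the char count (List.count)
def pvMinCount (strs : List String) (c : Char) : Int :=
  match strs.map (fun s => (s.toList.count c : Int)) with
  | [] => 0  -- unreachable: strs ≠ [] whenever this is called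
  | x :: xs => xs.foldl min x

def dup_with_same_symbol_count_alt (strs : List String) : Int :=
  match strs with
  | [] => 0  -- unreachable under Pre_ (Python raises IndexError on strs[0])
  | s0 :: _ =>
    -- for c in dict.fromkeys(strs[0]): total += min(...)
    (PySem.List.dedup s0.toList).foldl (fun total c => total + pvMinCount strs c) 0

-- ===== PRECONDITION & SPEC =====
-- Pre_ excludes only the empty list, on which Python A raises IndexError at strs[0] (B raises there too).
def Pre_dup_with_same_symbol_count (strs : List String) : Prop := strs ≠ []
instance (strs : List String) : Decidable (Pre_dup_with_same_symbol_count strs) := by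
  unfold Pre_dup_with_same_symbol_count; infer_instance

def pvWitness_dup_with_same_symbol_count : List String := ["abca", "cab", "bacc"]

def Spec_dup_with_same_symbol_count (strs : List String) (out : Int) : Prop :=
  out = dup_with_same_symbol_count_alt strs
instance (strs : List String) (out : Int) : Decidable (Spec_dup_with_same_symbol_count strs out) := by
  unfold Spec_dup_with_same_symbol_count; infer_instance

-- ===== CLAIM (what is proved, stated in full; the proofs are below) =====
def Claim_equal_dup_with_same_symbol_count : Prop :=
  ∀ (strs : List String), Dom_dup_with_same_symbol_count strs →
    Pre_dup_with_same_symbol_count strs →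
    Spec_dup_with_same_symbol_count strs (dup_with_same_symbol_count strs)

-- ===== LEMMAS AND PROOFS =====

-- pvM s0 l c: the minimum B computes for char c, first string s0 and remaining strings l
def pvM (s0 : String) (l : List String) (c : Char) : Int :=
  (l.map (fun s => (s.toList.count c : Int))).foldl min (s0.toList.count c)

theorem pvMinCount_cons (s0 : String) (rest : List String) (c : Char) :
    pvMinCount (s0 :: rest) c = pvM s0 rest c := by
  simp [pvMinCount, pvM]

theorem foldl_min_le_init (xs : List Int) (i : Int) : xs.foldl min i ≤ i := by
  induction xs generalizing i with
  | nil => simp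
  | cons x xs ih => exact le_trans (ih (min i x)) (min_le_left i x)

theorem foldl_min_nonneg (xs : List Int) (i : Int) (hi : 0 ≤ i)
    (hx : ∀ x ∈ xs, 0 ≤ x) : 0 ≤ xs.foldl min i := by
  induction xs generalizing i with
  | nil => simpa
  | cons x xs ih =>
    exact ih (min i x) (le_min hi (hx x (by simp))) (fun y hy => hx y (by simp [hy]))

theorem pvM_nonneg (s0 : String) (l : List String) (c : Char) : 0 ≤ pvM s0 l c := by
  apply foldl_min_nonneg
  · positivity
  · intro x hx
    simp only [List.mem_map] at hx
    obtain ⟨s, _, rfl⟩ := hx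
    positivity

theorem pvM_nil (s0 : String) (c : Char) : pvM s0 [] c = (s0.toList.count c : Int) := rfl

theorem pvM_append_singleton (s0 : String) (l : List String) (s : String) (c : Char) :
    pvM s0 (l ++ [s]) c = min (pvM s0 l c) (s.toList.count c : Int) := by
  simp [pvM, List.foldl_append]

theorem pvM_append_le (s0 : String) (l l' : List String) (c : Char) :
    pvM s0 (l ++ l') c ≤ pvM s0 l c := by
  simp only [pvM, List.map_append, List.foldl_append]
  exact foldl_min_le_init _ _

-- sum over a filtered list equals the full sum when dropped entries map to 0
theorem sum_map_filter_eq (l : List Char) (p : Char → Bool) (f : Char → Int)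
    (h : ∀ c ∈ l, p c = false → f c = 0) :
    ((l.filter p).map f).sum = (l.map f).sum := by
  induction l with
  | nil => rfl
  | cons x xs ih =>
    by_cases hp : p x = true
    · simp [List.filter_cons, hp, ih (fun c hc hf => h c (by simp [hc]) hf)]
    · simp only [Bool.not_eq_true] at hp
      simp [List.filter_cons, hp, h x (by simp) hp,
        ih (fun c hc hf => h c (by simp [hc]) hf)]

-- pvCounterA is Dict.counter
theorem pvCounterA_eq (s : List Char) : pvCounterA s = PySem.Dict.counter s := by
  have hstep : (fun (a : PySem.Dict Char Int) (c : Char) =>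
      if a.contains c then a.insert c (a.getD c 0 + 1) else a.insert c 1) =
      (fun (a : PySem.Dict Char Int) (c : Char) => a.insert c (a.getD c 0 + 1)) := by
    funext a c
    by_cases h : a.contains c = true
    · simp [h]
    · simp only [Bool.not_eq_true] at h
      rw [if_neg (by simp [h]), PySem.Dict.getD_of_not_contains a 0 h]
      norm_num
  rw [pvCounterA, hstep, PySem.Dict.foldl_insert_getD_add_one_eq_counter]

-- ==== erase lemmas (derived; PYSEM.md lists none for Dict.erase) ====

theorem dict_get?_erase_of_ne {d : PySem.Dict Char Int} {c k : Char} (h : c ≠ k) :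
    (d.erase k).get? c = d.get? c := by
  simp only [PySem.Dict.erase, PySem.Dict.get?]
  congr 1
  induction d.items with
  | nil => rfl
  | cons p ps ih =>
    by_cases hk : p.1 = k
    · simp [hk, Ne.symm h, ih]
    · by_cases hc : p.1 = c
      · simp [hc, h]
      · simp [hk, hc, ih]

theorem dict_get?_erase_self {d : PySem.Dict Char Int} {k : Char} :
    (d.erase k).get? k = none := by
  simp only [PySem.Dict.erase, PySem.Dict.get?, Option.map_eq_none_iff]
  rw [List.find?_eq_none]
  intro p hp
  simp only [List.mem_filter] at hp
  simpa using hp.2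

theorem dict_keys_erase {d : PySem.Dict Char Int} {k : Char} :
    (d.erase k).keys = d.keys.filter (fun c => !(c == k)) := by
  simp only [PySem.Dict.erase, PySem.Dict.keys]
  rw [List.filter_map]
  rfl

theorem dict_contains_erase_of_ne {d : PySem.Dict Char Int} {c k : Char} (h : c ≠ k) :
    (d.erase k).contains c = d.contains c := by
  rw [PySem.Dict.contains_eq_isSome_get?, PySem.Dict.contains_eq_isSome_get?,
    dict_get?_erase_of_ne h]

-- ==== the fold over start.keys (pvStepA) ====

theorem foldStep_get?_not_mem (a : PySem.Dict Char Int) (ks : List Char)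
    (d : PySem.Dict Char Int) (c : Char) (hc : c ∉ ks) :
    (ks.foldl (fun st k =>
        if a.contains k then st.insert k (min (a.getD k 0) (st.getD k 0)) else st.erase k)
      d).get? c = d.get? c := by
  induction ks generalizing d with
  | nil => rfl
  | cons k ks ih =>
    have hck : c ≠ k := fun h => hc (h ▸ List.mem_cons_self)
    have hcs : c ∉ ks := fun h => hc (List.mem_cons_of_mem _ h)
    simp only [List.foldl_cons]
    rw [ih _ hcs]
    by_cases ha : a.contains k = true
    · simp [ha, PySem.Dict.get?_insert_of_ne _ _ hck]
    · simp only [Bool.not_eq_true] at ha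
      simp [ha, dict_get?_erase_of_ne hck]

theorem foldStep_get?_mem (a : PySem.Dict Char Int) (ks : List Char)
    (d : PySem.Dict Char Int) (c : Char) (hnd : ks.Nodup) (hc : c ∈ ks) :
    (ks.foldl (fun st k =>
        if a.contains k then st.insert k (min (a.getD k 0) (st.getD k 0)) else st.erase k)
      d).get? c =
      if a.contains c then some (min (a.getD c 0) (d.getD c 0)) else none := by
  induction ks generalizing d with
  | nil => exact absurd hc List.not_mem_nil
  | cons k ks ih =>
    simp only [List.nodup_cons] at hnd
    simp only [List.foldl_cons]
    rcases List.mem_cons.mp hc with rfl | hmem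
    · rw [foldStep_get?_not_mem a ks _ c hnd.1]
      by_cases ha : a.contains c = true
      · simp [ha, PySem.Dict.get?_insert_self]
      · simp only [Bool.not_eq_true] at ha
        simp [ha, dict_get?_erase_self]
    · have hck : c ≠ k := fun h => hnd.1 (h ▸ hmem)
      rw [ih _ hnd.2 hmem]
      by_cases ha : a.contains k = true
      · simp [ha, PySem.Dict.getD_insert_of_ne _ _ _ hck]
      · simp only [Bool.not_eq_true] at ha
        have hg : (d.erase k).getD c 0 = d.getD c 0 := by
          rw [PySem.Dict.getD_eq_get?_getD, dict_get?_erase_of_ne hck,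
            ← PySem.Dict.getD_eq_get?_getD]
        simp [ha, hg]

theorem foldStep_keys (a : PySem.Dict Char Int) (ks : List Char)
    (d : PySem.Dict Char Int) (hnd : ks.Nodup) (hk : ∀ c ∈ ks, d.contains c = true) :
    (ks.foldl (fun st k =>
        if a.contains k then st.insert k (min (a.getD k 0) (st.getD k 0)) else st.erase k)
      d).keys = d.keys.filter (fun c => !(decide (c ∈ ks)) || a.contains c) := by
  induction ks generalizing d with
  | nil => simp
  | cons k ks ih =>
    simp only [List.nodup_cons] at hnd
    simp only [List.foldl_cons]
    by_cases ha : a.contains k = true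
    · rw [if_pos ha]
      rw [ih _ hnd.2 (fun c hc => by
        rw [PySem.Dict.contains_insert]
        simp [hk c (List.mem_cons_of_mem _ hc)])]
      rw [PySem.Dict.keys_insert_of_contains _ _ (hk k List.mem_cons_self)]
      apply List.filter_congr
      intro x _
      by_cases hxk : x = k
      · subst hxk; simp [ha, hnd.1]
      · simp [List.mem_cons, hxk]
    · simp only [Bool.not_eq_true] at ha
      rw [if_neg (by simp [ha])]
      rw [ih _ hnd.2 (fun c hc => by
        rw [dict_contains_erase_of_ne (fun h : c = k => hnd.1 (h ▸ hc))]
        exact hk c (List.mem_cons_of_mem _ hc))]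
      rw [dict_keys_erase, List.filter_filter]
      apply List.filter_congr
      intro x _
      by_cases hxk : x = k
      · subst hxk; simp [ha]
      · simp [List.mem_cons, hxk]

-- ==== the main loop invariant ====

theorem pvLoopA_sum (s0 : String) (rest : List String) :
    ∀ (l : List String) (d : PySem.Dict Char Int),
      d.keys = (PySem.List.dedup s0.toList).filter (fun c => decide (0 < pvM s0 l c)) →
      (∀ c ∈ d.keys, d.getD c 0 = pvM s0 l c) →
      (pvLoopA rest d).values.sum =
        ((PySem.List.dedup s0.toList).map (fun c => pvM s0 (l ++ rest) c)).sum := by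
  induction rest with
  | nil =>
    intro l d hkeys hval
    have hnd : d.keys.Nodup := by
      rw [hkeys]; exact (PySem.List.nodup_dedup s0.toList).filter _
    simp only [pvLoopA, List.append_nil]
    rw [PySem.Dict.values_eq_map_keys d hnd 0]
    rw [List.map_congr_left (fun c hc => hval c hc)]
    rw [hkeys]
    apply sum_map_filter_eq
    intro c _ hp
    have h1 := pvM_nonneg s0 l c
    simp only [decide_eq_false_iff_not, not_lt] at hp
    omega
  | cons s rest ih =>
    intro l d hkeys hval
    have hnd : d.keys.Nodup := by
      rw [hkeys]; exact (PySem.List.nodup_dedup s0.toList).filter _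
    simp only [pvLoopA]
    by_cases hsz : d.size = 0
    · rw [if_pos hsz]
      have hitems : d.items = [] := List.length_eq_zero_iff.mp hsz
      have hvals : d.values = [] := by simp [PySem.Dict.values, hitems]
      have hk0 : d.keys = [] := by simp [PySem.Dict.keys, hitems]
      rw [hvals]
      symm
      apply List.sum_eq_zero
      intro x hx
      simp only [List.mem_map] at hx
      obtain ⟨c, hc, rfl⟩ := hx
      rw [hk0] at hkeys
      have hz : ¬ (decide (0 < pvM s0 l c)) = true :=
        List.filter_eq_nil_iff.mp hkeys.symm c hc
      simp only [decide_eq_true_eq] at hz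
      have h1 := pvM_nonneg s0 l c
      have h2 := pvM_append_le s0 l (s :: rest) c
      have h3 := pvM_nonneg s0 (l ++ s :: rest) c
      omega
    · rw [if_neg hsz]
      have hain : ∀ c, (pvCounterA s.toList).contains c = s.toList.contains c := by
        intro c; rw [pvCounterA_eq, PySem.Dict.contains_counter]
      have haget : ∀ c, (pvCounterA s.toList).getD c 0 = (s.toList.count c : Int) := by
        intro c; rw [pvCounterA_eq, PySem.Dict.getD_counter]
      have hkcontains : ∀ c ∈ d.keys, d.contains c = true :=
        fun c hc => (PySem.Dict.contains_iff_mem_keys d c).mpr hc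
      have hkeys' : (pvStepA (pvCounterA s.toList) d).keys =
          (PySem.List.dedup s0.toList).filter
            (fun c => decide (0 < pvM s0 (l ++ [s]) c)) := by
        rw [pvStepA, foldStep_keys _ _ _ hnd hkcontains]
        rw [List.filter_congr (fun c hc => by
          simp only [hc, decide_true, Bool.not_true, Bool.false_or] :
          ∀ c ∈ d.keys, _ = (pvCounterA s.toList).contains c)]
        rw [hkeys, List.filter_filter]
        apply List.filter_congr
        intro c _
        rw [hain, pvM_append_singleton]
        by_cases h1 : 0 < pvM s0 l c <;> by_cases h2 : c ∈ s.toList <;>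
          simp [h1, h2, Int.natCast_pos, List.count_pos_iff]
      have hval' : ∀ c ∈ (pvStepA (pvCounterA s.toList) d).keys,
          (pvStepA (pvCounterA s.toList) d).getD c 0 = pvM s0 (l ++ [s]) c := by
        intro c hc
        rw [hkeys', List.mem_filter] at hc
        obtain ⟨hcd, hcp⟩ := hc
        simp only [decide_eq_true_eq] at hcp
        rw [pvM_append_singleton, lt_min_iff] at hcp
        have hcs : c ∈ s.toList := by
          have := hcp.2
          rwa [Int.natCast_pos, List.count_pos_iff] at this
        have hck : c ∈ d.keys := by
          rw [hkeys, List.mem_filter]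
          exact ⟨hcd, by simpa using hcp.1⟩
        have hac : (pvCounterA s.toList).contains c = true := by
          rw [hain]; simpa using hcs
        rw [PySem.Dict.getD_eq_get?_getD, pvStepA,
          foldStep_get?_mem _ _ _ _ hnd hck, if_pos hac]
        simp only [Option.getD_some]
        rw [haget, hval c hck, pvM_append_singleton, min_comm]
      have hres := ih (l ++ [s]) _ hkeys' hval'
      rwa [List.append_assoc, List.singleton_append] at hres

-- ===== VERDICT (by name: the statement is the Claim_ definition above) =====
theorem dup_with_same_symbol_count_spec : Claim_equal_dup_with_same_symbol_count := by
  intro strs _ hpre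
  unfold Spec_dup_with_same_symbol_count
  match strs with
  | [] => exact absurd rfl hpre
  | s0 :: rest =>
    show (pvLoopA rest (pvCounterA s0.toList)).values.sum = _
    have h0keys : (pvCounterA s0.toList).keys =
        (PySem.List.dedup s0.toList).filter (fun c => decide (0 < pvM s0 [] c)) := by
      rw [pvCounterA_eq, PySem.Dict.keys_counter, ← PySem.List.dedup_eq_ofList]
      symm
      rw [List.filter_eq_self]
      intro c hc
      rw [PySem.List.mem_dedup] at hc
      simp only [pvM_nil, decide_eq_true_eq]
      rwa [Int.natCast_pos, List.count_pos_iff]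
    have h0val : ∀ c ∈ (pvCounterA s0.toList).keys,
        (pvCounterA s0.toList).getD c 0 = pvM s0 [] c := by
      intro c _
      rw [pvCounterA_eq, PySem.Dict.getD_counter, pvM_nil]
    rw [pvLoopA_sum s0 rest [] _ h0keys h0val]
    show _ = (PySem.List.dedup s0.toList).foldl
      (fun total c => total + pvMinCount (s0 :: rest) c) 0
    have hmap : (PySem.List.dedup s0.toList).map (pvMinCount (s0 :: rest)) =
        (PySem.List.dedup s0.toList).map (fun c => pvM s0 rest c) :=
      List.map_congr_left fun c _ => pvMinCount_cons s0 rest c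
    rw [PySem.List.foldl_add, zero_add, List.nil_append, hmap]
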